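-- pv_equiv track=rewrite | github.com/rawatpranjal/survey-of-reinforcement-learning-in-economics | archive/ch05_rl_as_behaviour/sims/optimal_stopping.py | optimal_stopping_problem
-- ===== SOURCE A (Python) =====
-- def optimal_stopping_problem(u):
--     """
--     Solves a general optimal stopping problem.
--
--     Parameters:
--     u (list): List of utility values for each time period.
--
--     Returns:
--     optimal_day (int): The optimal day to stop (1-indexed).
--     V (list): List of computed value functions for each day.
--     """
--
--     T = len(u)  # Number of time periods
--     V = [0] * T  # Initialize the value function V
--
--     # Base case: On the last day, the only choice is to stop
--     V[T-1] = u[T-1]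
--
--     # Recursive case: Compute V_t for t = T-1, ..., 1
--     for t in range(T-2, -1, -1):
--         V[t] = max(u[t], V[t+1])  # Decide whether to stop or continue
--
--     # Find the first day where stopping is optimal
--     optimal_day = None
--     for t in range(T-1):  # Go through all days except the last one
--         if u[t] > V[t+1]:  # If stopping today is better than waiting
--             optimal_day = t + 1  # Store the optimal day (1-indexed)
--             break
--     if optimal_day is None:
--         optimal_day = T  # Stop on the last day if no better day was found
--
--     return optimal_day, V
-- ===== SOURCE B (Python) =====
-- def optimal_stopping_problem(u):
--     """Single backward pass: maintain the running suffix maximum (the value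
--     function) and the smallest 1-indexed day on which stopping beats waiting.
--     Same IndexError as the original on an empty utility list."""
--     best = u[-1]
--     rV = [best]
--     stop_day = len(u)
--     for t in range(len(u) - 2, -1, -1):
--         if u[t] > best:
--             stop_day = t + 1
--             best = u[t]
--         rV.append(best)
--     rV.reverse()
--     return stop_day, rV
-- ===== Notes on version B (the rewrite author's own statement) =====
-- stated objective: faster
-- what changed: A builds the value array with a backward pass and then forward-scans it for the first day where stopping beats waiting; B fuses everything into one backward pass that maintains the running suffix maximum and the smallest qualifying day, building the value list back-to-front and reversing once.
import Mathlib
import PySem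

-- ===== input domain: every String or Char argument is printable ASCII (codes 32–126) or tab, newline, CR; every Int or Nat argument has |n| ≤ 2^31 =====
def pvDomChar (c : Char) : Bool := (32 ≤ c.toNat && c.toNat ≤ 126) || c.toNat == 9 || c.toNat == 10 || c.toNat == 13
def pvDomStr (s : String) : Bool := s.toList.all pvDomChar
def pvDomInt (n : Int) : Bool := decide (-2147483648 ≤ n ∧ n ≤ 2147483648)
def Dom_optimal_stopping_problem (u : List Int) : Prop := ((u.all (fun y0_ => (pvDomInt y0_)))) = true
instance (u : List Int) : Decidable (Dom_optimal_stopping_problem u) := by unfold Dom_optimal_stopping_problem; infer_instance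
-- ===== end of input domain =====

-- B fuses A's two passes (build value array, then forward-scan) into one backward pass
-- keeping a running suffix maximum and the smallest qualifying day; same return value on
-- every non-empty input (both raise IndexError on []).

-- ===== PORT A =====
-- A's backward loop: for t in range(T-2, -1, -1): V[t] = max(u[t], V[t+1])
def pvA_setloop (u : List Int) : List Int → List Int → List Int
  | V, [] => V
  | V, t :: rest =>
      pvA_setloop u
        (PySem.List.pySetD V t (max (PySem.List.pyGetD u t 0) (PySem.List.pyGetD V (t + 1) 0))) rest

-- A's forward scan with break: first t in range(T-1) with u[t] > V[t+1]
def pvA_find (u V : List Int) : List Int → Option Int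
  | [] => none
  | t :: rest =>
      if PySem.List.pyGetD u t 0 > PySem.List.pyGetD V (t + 1) 0 then some (t + 1)
      else pvA_find u V rest

def optimal_stopping_problem (u : List Int) : Int × List Int :=
  let T : Int := u.length
  let V0 : List Int := List.replicate u.length 0
  let V1 := PySem.List.pySetD V0 (T - 1) (PySem.List.pyGetD u (T - 1) 0)
  let V := pvA_setloop u V1 (PySem.List.pyRange (T - 2) (-1) (-1))
  let optimal_day : Int :=
    match pvA_find u V (PySem.List.pyRange 0 (T - 1) 1) with
    | some d => d
    | none => T
  (optimal_day, V)

-- ===== PORT B =====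
-- B's single backward loop over state (best, stop_day, rV)
def pvB_loop (u : List Int) : (Int × Int × List Int) → List Int → Int × Int × List Int
  | st, [] => st
  | (best, stop_day, rV), t :: rest =>
      let ut := PySem.List.pyGetD u t 0
      if ut > best then pvB_loop u (ut, t + 1, rV ++ [ut]) rest
      else pvB_loop u (best, stop_day, rV ++ [best]) rest

def optimal_stopping_problem_alt (u : List Int) : Int × List Int :=
  let best := PySem.List.pyGetD u (-1) 0
  let st := pvB_loop u (best, (u.length : Int), [best])
              (PySem.List.pyRange ((u.length : Int) - 2) (-1) (-1))
  (st.2.1, st.2.2.reverse)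

-- ===== PRECONDITION & SPEC =====
-- Pre_ excludes only the empty list, on which both Pythons raise IndexError (u[-1] / V[-1]).
def Pre_optimal_stopping_problem (u : List Int) : Prop := u ≠ []
instance (u : List Int) : Decidable (Pre_optimal_stopping_problem u) := by
  unfold Pre_optimal_stopping_problem; infer_instance

def pvWitness_optimal_stopping_problem : List Int := [3, 1, 2]

def Spec_optimal_stopping_problem (u : List Int) (out : Int × List Int) : Prop := out = optimal_stopping_problem_alt u
instance (u : List Int) (out : Int × List Int) : Decidable (Spec_optimal_stopping_problem u out) := by unfold Spec_optimal_stopping_problem; infer_instance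

-- ===== CLAIM (what is proved, stated in full; the proofs are below) =====
def Claim_equal_optimal_stopping_problem : Prop := ∀ (u : List Int), Dom_optimal_stopping_problem u → Pre_optimal_stopping_problem u → Spec_optimal_stopping_problem u (optimal_stopping_problem u)

-- ===== LEMMAS AND PROOFS =====

-- suffix maximum of a non-empty list (junk 0 on [])
def pvS : List Int → Int
  | [] => 0
  | [x] => x
  | x :: y :: r => max x (pvS (y :: r))

-- first t in [a, b) with u[t] > suffix-max of u after t, as (t+1 : Int)
def pvFind (u : List Int) (a b : Nat) : Option Int :=
  if h : a < b then
    if u.getD a 0 > pvS (u.drop (a + 1)) then some ((a : Int) + 1)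
    else pvFind u (a + 1) b
  else none
termination_by b - a

theorem pvS_cons_of_ne (x : Int) (l : List Int) (h : l ≠ []) :
    pvS (x :: l) = max x (pvS l) := by
  cases l with
  | nil => exact absurd rfl h
  | cons y r => rfl

theorem pvS_drop_succ (u : List Int) (t : Nat) (h1 : t < u.length) :
    pvS (u.drop t) = if t + 1 < u.length then max (u.getD t 0) (pvS (u.drop (t + 1))) else u.getD t 0 := by
  have hd : u.drop t = u[t] :: u.drop (t + 1) := List.drop_eq_getElem_cons h1
  have hget : u.getD t 0 = u[t] := List.getD_eq_getElem u 0 h1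
  by_cases h2 : t + 1 < u.length
  · have hne : u.drop (t + 1) ≠ [] := by
      have : (u.drop (t + 1)).length = u.length - (t + 1) := List.length_drop ..
      intro hnil; rw [hnil] at this; simp at this; omega
    rw [hd, pvS_cons_of_ne _ _ hne, if_pos h2, hget]
  · have hnil : u.drop (t + 1) = [] := by
      apply List.drop_eq_nil_of_le; omega
    rw [hd, hnil, if_neg h2, hget]; rfl

theorem pvFind_stop (u : List Int) (a b : Nat) (h : b ≤ a) : pvFind u a b = none := by
  rw [pvFind]; exact dif_neg (by omega)

theorem pvFind_step (u : List Int) (a b : Nat) (h : a < b) :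
    pvFind u a b = if u.getD a 0 > pvS (u.drop (a + 1)) then some ((a : Int) + 1)
                   else pvFind u (a + 1) b := by
  rw [pvFind]; exact dif_pos h

theorem pvFind_snoc (u : List Int) (a b : Nat) (h : a ≤ b) :
    pvFind u a (b + 1) =
      (pvFind u a b).orElse (fun _ =>
        if u.getD b 0 > pvS (u.drop (b + 1)) then some ((b : Int) + 1) else none) := by
  suffices H : ∀ m a, b - a ≤ m → a ≤ b → pvFind u a (b + 1) =
      (pvFind u a b).orElse (fun _ =>
        if u.getD b 0 > pvS (u.drop (b + 1)) then some ((b : Int) + 1) else none) by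
    exact H (b - a) a le_rfl h
  intro m
  induction m with
  | zero =>
      intro a h1 h2
      have hab : a = b := by omega
      subst hab
      rw [pvFind_step u a (a + 1) (by omega), pvFind_stop u (a + 1) (a + 1) le_rfl,
          pvFind_stop u a a le_rfl]
      by_cases hc : u.getD a 0 > pvS (u.drop (a + 1)) <;> simp
  | succ n ih =>
      intro a h1 h2
      by_cases hab : a = b
      · subst hab
        rw [pvFind_step u a (a + 1) (by omega), pvFind_stop u (a + 1) (a + 1) le_rfl,
            pvFind_stop u a a le_rfl]
        by_cases hc : u.getD a 0 > pvS (u.drop (a + 1)) <;> simp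
      · have hlt : a < b := by omega
        rw [pvFind_step u a (b + 1) (by omega), pvFind_step u a b hlt]
        by_cases hc : u.getD a 0 > pvS (u.drop (a + 1))
        · rw [if_pos hc, if_pos hc]; rfl
        · rw [if_neg hc, if_neg hc]
          exact ih (a + 1) (by omega) (by omega)

-- A's backward loop fills V with suffix maxima
theorem pv_getD_set_eq (V : List Int) (j : Nat) (v : Int) (h : j < V.length) :
    (V.set j v).getD j 0 = v := by
  rw [List.getD_eq_getElem _ _ (by simpa using h)]; simp

theorem pv_getD_set_ne (V : List Int) (j i : Nat) (v : Int) (h : i ≠ j) :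
    (V.set j v).getD i 0 = V.getD i 0 := by
  simp [List.getD, List.getElem?_set_ne (Ne.symm h)]

theorem pvA_setloop_spec (u : List Int) (k : Nat) : ∀ (V : List Int),
    V.length = u.length → k + 2 ≤ u.length →
    (∀ i, k < i → i < u.length → V.getD i 0 = pvS (u.drop i)) →
    (pvA_setloop u V (PySem.List.pyRange (k : Int) (-1) (-1))).length = u.length ∧
    ∀ i, i < u.length → (pvA_setloop u V (PySem.List.pyRange (k : Int) (-1) (-1))).getD i 0 = pvS (u.drop i) := by
  induction k with
  | zero =>
      intro V hlen hk hV
      rw [show PySem.List.pyRange ((0 : Nat) : Int) (-1) (-1) = [((0 : Nat) : Int)] by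
        rw [PySem.List.pyRange_neg_one_cons (by omega), PySem.List.pyRange_neg_one_eq_nil (by omega)]]
      simp only [pvA_setloop]
      rw [show ((0 : Nat) : Int) + 1 = ((1 : Nat) : Int) by norm_num]
      simp only [PySem.List.pySetD_natCast, PySem.List.pyGetD_natCast]
      constructor
      · simp [hlen]
      · intro i hi
        by_cases h0 : i = 0
        · subst h0
          rw [pv_getD_set_eq _ _ _ (by omega), hV 1 (by omega) (by omega),
              pvS_drop_succ u 0 (by omega), if_pos (show 0 + 1 < u.length by omega)]
        · rw [pv_getD_set_ne _ _ _ _ h0]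
          exact hV i (by omega) hi
  | succ k ih =>
      intro V hlen hk hV
      rw [show ((k + 1 : Nat) : Int) = ((k : Nat) : Int) + 1 by push_cast; ring,
          PySem.List.pyRange_neg_one_cons (by omega),
          show ((k : Nat) : Int) + 1 - 1 = ((k : Nat) : Int) by ring]
      simp only [pvA_setloop]
      rw [show ((k : Nat) : Int) + 1 = ((k + 1 : Nat) : Int) by push_cast; ring,
          show ((k + 1 : Nat) : Int) + 1 = ((k + 2 : Nat) : Int) by push_cast; ring]
      simp only [PySem.List.pySetD_natCast, PySem.List.pyGetD_natCast]
      set v := max (u.getD (k + 1) 0) (V.getD (k + 2) 0) with hv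
      have hvS : v = pvS (u.drop (k + 1)) := by
        rw [hv, hV (k + 2) (by omega) (by omega),
            pvS_drop_succ u (k + 1) (by omega), if_pos (by omega)]
      apply ih (V.set (k + 1) v)
      · simp [hlen]
      · omega
      · intro i hki hi
        by_cases h0 : i = k + 1
        · subst h0
          rw [pv_getD_set_eq _ _ _ (by omega), hvS]
        · rw [pv_getD_set_ne _ _ _ _ h0]
          exact hV i (by omega) hi

-- A's forward scan equals pvFind on a suffix-max array
theorem pvA_find_spec (u V : List Int) (b : Nat) (hb : b + 1 ≤ u.length)
    (hV : ∀ i, i < u.length → V.getD i 0 = pvS (u.drop i)) :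
    ∀ a : Nat, pvA_find u V (PySem.List.pyRange (a : Int) (b : Int) 1) = pvFind u a b := by
  suffices H : ∀ (m a : Nat), b - a ≤ m →
      pvA_find u V (PySem.List.pyRange (a : Int) (b : Int) 1) = pvFind u a b by
    intro a
    exact H (b - a) a le_rfl
  intro m
  induction m with
  | zero =>
      intro a h1
      rw [PySem.List.pyRange_one_eq_nil (by omega), pvFind_stop u a b (by omega)]
      rfl
  | succ n ih =>
      intro a h1
      by_cases hab : b ≤ a
      · rw [PySem.List.pyRange_one_eq_nil (by omega), pvFind_stop u a b hab]
        rfl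
      · have hlt : a < b := by omega
        rw [PySem.List.pyRange_one_cons (by omega)]
        simp only [pvA_find]
        rw [show ((a : Nat) : Int) + 1 = ((a + 1 : Nat) : Int) by push_cast; ring]
        simp only [PySem.List.pyGetD_natCast]
        rw [hV (a + 1) (by omega), pvFind_step u a b hlt]
        by_cases hc : u.getD a 0 > pvS (u.drop (a + 1))
        · rw [if_pos hc, if_pos hc]; push_cast; ring_nf
        · rw [if_neg hc, if_neg hc]
          exact ih (a + 1) (by omega)

theorem pv_getD_orElse (x : Option Int) (y : Option Int) (s : Int) :
    (x.orElse (fun _ => y)).getD s = x.getD (y.getD s) := by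
  cases x <;> rfl

-- B's backward loop computes suffix max, first stopping day, and the value list reversed
theorem pvB_loop_spec (u : List Int) (k : Nat) (hk : k + 2 ≤ u.length) :
    ∀ (stop : Int) (rV : List Int),
    pvB_loop u (pvS (u.drop (k + 1)), stop, rV) (PySem.List.pyRange (k : Int) (-1) (-1)) =
      (pvS u, (pvFind u 0 (k + 1)).getD stop,
       rV ++ ((List.range (k + 1)).reverse.map (fun t => pvS (u.drop t)))) := by
  induction k with
  | zero =>
      intro stop rV
      rw [show PySem.List.pyRange ((0 : Nat) : Int) (-1) (-1) = [((0 : Nat) : Int)] by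
        rw [PySem.List.pyRange_neg_one_cons (by omega), PySem.List.pyRange_neg_one_eq_nil (by omega)]]
      simp only [pvB_loop, PySem.List.pyGetD_natCast]
      have hS0 : pvS u = max (u.getD 0 0) (pvS (u.drop (0 + 1))) := by
        have h := pvS_drop_succ u 0 (by omega)
        rw [if_pos (show 0 + 1 < u.length by omega)] at h
        rw [← h, List.drop_zero]
      rw [pvFind_step u 0 1 (by omega), pvFind_stop u 1 1 le_rfl]
      by_cases hc : u.getD 0 0 > pvS (u.drop (0 + 1))
      · rw [if_pos hc, if_pos hc]
        have hbest : u.getD 0 0 = pvS u := by rw [hS0]; omega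
        simp only [List.getD] at hbest
        simp [hbest]
      · rw [if_neg hc, if_neg hc]
        have hbest : pvS (u.drop (0 + 1)) = pvS u := by rw [hS0]; omega
        simp only [Nat.zero_add, List.drop_one] at hbest
        simp [hbest]
  | succ k ih =>
      intro stop rV
      rw [show ((k + 1 : Nat) : Int) = ((k : Nat) : Int) + 1 by push_cast; ring,
          PySem.List.pyRange_neg_one_cons (by omega),
          show ((k : Nat) : Int) + 1 - 1 = ((k : Nat) : Int) by ring]
      simp only [pvB_loop]
      rw [show ((k : Nat) : Int) + 1 = ((k + 1 : Nat) : Int) by push_cast; ring]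
      simp only [PySem.List.pyGetD_natCast]
      have hSk : pvS (u.drop (k + 1)) = max (u.getD (k + 1) 0) (pvS (u.drop (k + 1 + 1))) := by
        rw [pvS_drop_succ u (k + 1) (by omega), if_pos (show k + 1 + 1 < u.length by omega)]
      have hsnoc := pvFind_snoc u 0 (k + 1) (by omega)
      have hrange : (List.range (k + 1 + 1)).reverse.map (fun t => pvS (u.drop t))
          = pvS (u.drop (k + 1)) :: (List.range (k + 1)).reverse.map (fun t => pvS (u.drop t)) := by
        rw [List.range_succ]; simp
      by_cases hc : u.getD (k + 1) 0 > pvS (u.drop (k + 1 + 1))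
      · rw [if_pos hc]
        have hbest : u.getD (k + 1) 0 = pvS (u.drop (k + 1)) := by rw [hSk]; omega
        rw [hbest, ih (by omega) (((k + 1 : Nat) : Int) + 1) (rV ++ [pvS (u.drop (k + 1))]),
            hsnoc, if_pos hc, pv_getD_orElse, hrange]
        simp
      · rw [if_neg hc]
        have hbest : pvS (u.drop (k + 1 + 1)) = pvS (u.drop (k + 1)) := by rw [hSk]; omega
        rw [hbest, ih (by omega) stop (rV ++ [pvS (u.drop (k + 1))]),
            hsnoc, if_neg hc, pv_getD_orElse, hrange]
        simp

-- ===== VERDICT (by name: the statement is the Claim_ definition above) =====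
theorem optimal_stopping_problem_spec : Claim_equal_optimal_stopping_problem := by
  intro u hdom hpre
  unfold Spec_optimal_stopping_problem
  have hn : 0 < u.length := List.length_pos_of_ne_nil hpre
  by_cases h1 : u.length = 1
  · obtain ⟨x, rfl⟩ := List.length_eq_one_iff.mp h1
    unfold optimal_stopping_problem optimal_stopping_problem_alt
    dsimp only
    norm_num [PySem.List.pyRange_neg_one_eq_nil, PySem.List.pyRange_one_eq_nil,
      pvA_setloop, pvA_find, pvB_loop, PySem.List.pySetD, PySem.List.pyGetD,
      PySem.List.pySet?, PySem.List.pyGet?, PySem.List.pyIdx?]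
  · have h2 : 2 ≤ u.length := by omega
    have hc1 : ((u.length : Int) - 1) = ((u.length - 1 : Nat) : Int) := by push_cast [hn]; ring
    have hc2 : ((u.length : Int) - 2) = ((u.length - 2 : Nat) : Int) := by push_cast [h2]; ring
    have hSlast : pvS (u.drop (u.length - 1)) = u.getD (u.length - 1) 0 := by
      rw [pvS_drop_succ u (u.length - 1) (by omega), if_neg (by omega)]
    unfold optimal_stopping_problem optimal_stopping_problem_alt
    dsimp only
    rw [hc1, hc2]
    simp only [PySem.List.pySetD_natCast, PySem.List.pyGetD_natCast]
    set V1 := (List.replicate u.length (0 : Int)).set (u.length - 1) (u.getD (u.length - 1) 0) with hV1def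
    have hV1len : V1.length = u.length := by simp [hV1def]
    have hV1 : ∀ i, u.length - 2 < i → i < u.length → V1.getD i 0 = pvS (u.drop i) := by
      intro i hlo hhi
      have hi : i = u.length - 1 := by omega
      subst hi
      rw [hV1def, pv_getD_set_eq _ _ _ (by simp; omega), hSlast]
    obtain ⟨hWlen, hW⟩ := pvA_setloop_spec u (u.length - 2) V1 hV1len (by omega) hV1
    set W := pvA_setloop u V1 (PySem.List.pyRange ((u.length - 2 : Nat) : Int) (-1) (-1)) with hWdef
    have hfind := pvA_find_spec u W (u.length - 1) (by omega) hW 0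
    rw [show ((0 : Nat) : Int) = 0 by norm_num] at hfind
    -- B side
    have hbest0 : PySem.List.pyGetD u (-1) (0 : Int) = pvS (u.drop (u.length - 1)) := by
      rw [PySem.List.pyGetD_neg_one u 0 hpre, hSlast, List.getLast_eq_getElem,
          List.getD_eq_getElem u 0 (by omega)]
    rw [hbest0]
    have hB := pvB_loop_spec u (u.length - 2) (by omega) (u.length : Int) [pvS (u.drop (u.length - 1))]
    rw [show u.length - 2 + 1 = u.length - 1 by omega] at hB
    rw [hB]
    -- value lists agree
    have hWval : W = (List.range u.length).map (fun t => pvS (u.drop t)) := by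
      apply List.ext_getElem
      · simp [hWlen]
      · intro i hi hi'
        have := hW i (by omega)
        rw [List.getD_eq_getElem _ _ (by omega)] at this
        simpa using this
    have hVrev : ([pvS (u.drop (u.length - 1))] ++
          (List.range (u.length - 1)).reverse.map (fun t => pvS (u.drop t))).reverse
        = (List.range u.length).map (fun t => pvS (u.drop t)) := by
      rw [List.reverse_append, List.map_reverse, List.reverse_reverse]
      rw [show u.length = (u.length - 1) + 1 by omega, List.range_succ]
      simp
    rw [hVrev, hfind, hWval]
    cases hopt : pvFind u 0 (u.length - 1) <;> simp
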